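-- pv_equiv track=rewrite | github.com/fayaz35341/Max-Consecutive-Bit | Max-Consecutive-Bit.py | maxConsecBits
-- ===== SOURCE A (Python) =====
-- def maxConsecBits(arr):
--     #code here
--     maxi=0
--     c=0
--     r=0
--     for i in range(len(arr)):
--         if arr[i]==1:
--             c+=1
--             r=0
--             maxi=max(maxi,c)
--         elif arr[i]==0:
--             r+=1
--             c=0
--             maxi=max(maxi,r)
--
--     return maxi
-- ===== SOURCE B (Python) =====
-- def maxConsecBits(arr):
--     # Run-length encoding: keep only the 0/1 elements (A ignores any other
--     # value without resetting its counters), group consecutive equal bits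
--     # into runs, return the longest run length (0 if there are no bits).
--     bits = [x for x in arr if x == 1 or x == 0]
--     runs = []  # list of [value, length]
--     for x in bits:
--         if runs and runs[-1][0] == x:
--             runs[-1][1] += 1
--         else:
--             runs.append([x, 1])
--     return max((n for _, n in runs), default=0)
-- ===== Notes on version B (the rewrite author's own statement) =====
-- stated objective: alternative
-- what changed: Replaces the two parallel streaming counters (c for ones, r for zeros, each resetting the other) with a run-length encoding: filter to the 0/1 elements, group consecutive equal bits into runs, and take the maximum run length.
import Mathlib
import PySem

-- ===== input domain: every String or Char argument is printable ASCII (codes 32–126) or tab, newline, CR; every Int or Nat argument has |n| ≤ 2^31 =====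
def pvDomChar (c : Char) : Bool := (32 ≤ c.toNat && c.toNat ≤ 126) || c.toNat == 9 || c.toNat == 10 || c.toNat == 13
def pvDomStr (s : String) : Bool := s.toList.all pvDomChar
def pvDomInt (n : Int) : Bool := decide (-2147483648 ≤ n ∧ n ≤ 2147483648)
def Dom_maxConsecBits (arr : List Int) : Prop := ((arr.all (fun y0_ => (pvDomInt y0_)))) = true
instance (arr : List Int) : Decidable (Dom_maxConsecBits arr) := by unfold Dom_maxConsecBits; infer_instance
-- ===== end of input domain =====

-- B replaces A's two parallel streaming counters with run-length encoding:
-- filter to the 0/1 elements, group consecutive equal bits, take the longest run.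

-- ===== PORT A =====
-- A's loop 'for i in range(len(arr))' only reads arr[i]; ported as a fold over
-- the elements with state (maxi, c, r), branches in A's order.
def stepA (s : Int × Int × Int) (x : Int) : Int × Int × Int :=
  if x = 1 then (max s.1 (s.2.1 + 1), s.2.1 + 1, 0)
  else if x = 0 then (max s.1 (s.2.2 + 1), 0, s.2.2 + 1)
  else s

def maxConsecBits (arr : List Int) : Int :=
  (arr.foldl stepA (0, 0, 0)).1

-- ===== PORT B =====
-- Source B appends runs at the end and mutates runs[-1]; the fold keeps the run
-- list reversed and updates its head (the max over the lengths is the same).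
def stepB (acc : List (Int × Int)) (x : Int) : List (Int × Int) :=
  match acc with
  | (v, n) :: t => if v = x then (v, n + 1) :: t else (x, 1) :: (v, n) :: t
  | [] => [(x, 1)]

def maxConsecBits_alt (arr : List Int) : Int :=
  let bits := arr.filter (fun x => x == 1 || x == 0)
  let runs := bits.foldl stepB []
  (runs.map Prod.snd).foldl (fun b k => max b k) 0

-- ===== PRECONDITION & SPEC =====
def Spec_maxConsecBits (arr : List Int) (out : Int) : Prop := out = maxConsecBits_alt arr
instance (arr : List Int) (out : Int) : Decidable (Spec_maxConsecBits arr out) := by unfold Spec_maxConsecBits; infer_instance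

-- ===== CLAIM (what is proved, stated in full; the proofs are below) =====
def Claim_equal_maxConsecBits : Prop := ∀ (arr : List Int), Dom_maxConsecBits arr → Spec_maxConsecBits arr (maxConsecBits arr)

-- ===== LEMMAS AND PROOFS =====

def M0 (l : List Int) : Int := l.foldl (fun b k => max b k) 0

theorem foldl_max_shift : ∀ (l : List Int) (a b : Int),
    l.foldl (fun x y => max x y) (max a b) = max a (l.foldl (fun x y => max x y) b) := by
  intro l
  induction l with
  | nil => intro a b; rfl
  | cons k t ih =>
      intro a b
      simp only [List.foldl_cons]
      rw [max_assoc, ih]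

theorem M0_nonneg (l : List Int) : 0 ≤ M0 l := by
  cases l with
  | nil => simp [M0]
  | cons k t =>
      have h := foldl_max_shift t 0 k
      simp only [M0, List.foldl_cons]
      rw [h]
      exact le_max_left _ _

theorem M0_cons (k : Int) (l : List Int) (hk : 0 ≤ k) : M0 (k :: l) = max k (M0 l) := by
  have h1 := foldl_max_shift l 0 k
  have h2 := foldl_max_shift l k 0
  have hmax : max k (0 : Int) = k := by omega
  simp only [M0, List.foldl_cons]
  rw [h1]
  rw [hmax] at h2
  rw [h2]
  have := M0_nonneg l
  simp only [M0] at this ⊢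
  omega

theorem foldA_filter : ∀ (xs : List Int) (s : Int × Int × Int),
    xs.foldl stepA s = (xs.filter (fun x => x == 1 || x == 0)).foldl stepA s := by
  intro xs
  induction xs with
  | nil => intro s; rfl
  | cons x t ih =>
      intro s
      by_cases h1 : x = 1
      · simp [h1, ih]
      · by_cases h0 : x = 0
        · simp [h0, ih]
        · have hs : stepA s x = s := by simp [stepA, h1, h0]
          simp [h1, h0, List.foldl_cons, hs, ih]

theorem aux_eq : ∀ (xs : List Int) (cur n m : Int) (t : List (Int × Int)),
    (∀ y ∈ xs, y = 1 ∨ y = 0) → (cur = 1 ∨ cur = 0) → 1 ≤ n →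
    m = M0 (((cur, n) :: t).map Prod.snd) →
    (xs.foldl stepA (m, if cur = 1 then (n, 0) else (0, n))).1
      = M0 ((xs.foldl stepB ((cur, n) :: t)).map Prod.snd) := by
  intro xs
  induction xs with
  | nil =>
      intro cur n m t _ _ _ hm
      simpa using hm
  | cons x xs ih =>
      intro cur n m t hall hcur hn hm
      have hall' : ∀ y ∈ xs, y = 1 ∨ y = 0 := fun y hy => hall y (by simp [hy])
      have hmc : m = max n (M0 (t.map Prod.snd)) := by
        rw [hm, List.map_cons, M0_cons _ _ (by omega)]
      have hx : x = 1 ∨ x = 0 := hall x (by simp)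
      rcases hcur with hc | hc <;> rcases hx with hx1 | hx1 <;> subst hc <;> subst hx1
      · -- cur = 1, x = 1
        have H := ih 1 (n + 1) (max m (n + 1)) t hall' (Or.inl rfl) (by omega)
          (by rw [List.map_cons, M0_cons _ _ (by omega)]; omega)
        simp only [List.foldl_cons, stepA, stepB]
        norm_num at H ⊢
        exact H
      · -- cur = 1, x = 0
        have H := ih 0 1 m ((1, n) :: t) hall' (Or.inr rfl) (by omega)
          (by simp only [List.map_cons]
              rw [M0_cons _ _ (by omega), M0_cons _ _ (by omega)]; omega)
        simp only [List.foldl_cons, stepA, stepB]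
        norm_num at H ⊢
        rw [show max m (1 : Int) = m by omega]
        exact H
      · -- cur = 0, x = 1
        have H := ih 1 1 m ((0, n) :: t) hall' (Or.inl rfl) (by omega)
          (by simp only [List.map_cons]
              rw [M0_cons _ _ (by omega), M0_cons _ _ (by omega)]; omega)
        simp only [List.foldl_cons, stepA, stepB]
        norm_num at H ⊢
        rw [show max m (1 : Int) = m by omega]
        exact H
      · -- cur = 0, x = 0
        have H := ih 0 (n + 1) (max m (n + 1)) t hall' (Or.inr rfl) (by omega)
          (by rw [List.map_cons, M0_cons _ _ (by omega)]; omega)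
        simp only [List.foldl_cons, stepA, stepB]
        norm_num at H ⊢
        exact H

-- ===== VERDICT (by name: the statement is the Claim_ definition above) =====
theorem maxConsecBits_spec : Claim_equal_maxConsecBits := by
  intro arr _
  unfold Spec_maxConsecBits maxConsecBits maxConsecBits_alt
  rw [foldA_filter]
  set bits := arr.filter (fun x => x == 1 || x == 0) with hbits
  have hall : ∀ y ∈ bits, y = 1 ∨ y = 0 := by
    intro y hy
    have := List.of_mem_filter hy
    simpa using this
  cases hb : bits with
  | nil => simp
  | cons x xs =>
      have hx : x = 1 ∨ x = 0 := hall x (by rw [hb]; simp)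
      have hall' : ∀ y ∈ xs, y = 1 ∨ y = 0 := fun y hy => hall y (by rw [hb]; simp [hy])
      rcases hx with hx | hx <;> subst hx
      · have H := aux_eq xs 1 1 1 [] hall' (Or.inl rfl) (by omega) (by decide)
        simp only [List.foldl_cons, stepA, stepB]
        norm_num at H ⊢
        exact H
      · have H := aux_eq xs 0 1 1 [] hall' (Or.inr rfl) (by omega) (by decide)
        simp only [List.foldl_cons, stepA, stepB]
        norm_num at H ⊢
        exact H
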